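-- pv_equiv track=rewrite | github.com/celestiaorg/ipld-plugin-experiments | generate_report.py | parse_default_regions
-- ===== SOURCE A (Python) =====
-- def parse_default_regions(regions):
--     out = []
--     counts = {}
--     for region in regions:
--         if region in counts:
--             counts[region] = counts[region] + 1
--         else:
--             counts[region] = 1
--         out.append("{}-{}".format(region, counts[region]))
--     return out
-- ===== SOURCE B (Python) =====
-- def parse_default_regions(regions):
--     lst = list(regions)
--     n = len(lst)
--     out = [None] * n
--     seen = []
--     for r in lst:
--         if r not in seen:
--             seen.append(r)
--     for v in seen:
--         k = 0
--         for i in range(n):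
--             if lst[i] == v:
--                 k += 1
--                 out[i] = "{}-{}".format(v, k)
--     return out
-- ===== Notes on version B (the rewrite author's own statement) =====
-- stated objective: alternative
-- what changed: Replaces A's single position-major pass with a running-count dict by a value-major group-and-scatter: first collect the distinct regions in order (no dict), then for each distinct value scan the list numbering its occurrences and write the labels into a preallocated output array out of order.
import Mathlib
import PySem

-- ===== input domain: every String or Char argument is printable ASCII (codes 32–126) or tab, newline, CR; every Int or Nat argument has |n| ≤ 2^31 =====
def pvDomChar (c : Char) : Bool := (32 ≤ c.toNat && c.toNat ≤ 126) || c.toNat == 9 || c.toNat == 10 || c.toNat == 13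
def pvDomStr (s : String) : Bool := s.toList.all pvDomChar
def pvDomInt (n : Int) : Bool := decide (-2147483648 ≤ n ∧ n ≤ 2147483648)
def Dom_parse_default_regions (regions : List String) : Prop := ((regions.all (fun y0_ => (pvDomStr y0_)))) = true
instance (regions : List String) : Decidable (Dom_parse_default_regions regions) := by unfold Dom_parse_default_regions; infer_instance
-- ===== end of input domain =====

-- B replaces A's position-major running-count dict pass with a value-major group-and-scatter (distinct values first, then one numbering scan per value writing into a preallocated output); alternative decomposition, not faster.


-- ===== PORT A =====
def parse_default_regions (regions : List String) : List String :=
  (regions.foldl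
    (fun (st : List String × PySem.Dict String Int) region =>
      let counts :=
        if st.2.contains region then
          st.2.insert region (st.2.getD region 0 + 1)
        else
          st.2.insert region 1
      (st.1 ++ [region ++ "-" ++ PySem.Int.toStr (counts.getD region 0)], counts))
    ([], PySem.Dict.empty)).1

-- ===== PORT B =====
-- Python's [None]*n with every slot provably filled is ported as List (Option String)
-- unwrapped with getD "" at the end; range(n) indices satisfy 0 ≤ i < n, so Nat
-- List.range n and lst.getD i "" are exact for lst[i].
def parse_default_regions_alt (regions : List String) : List String :=
  let lst := regions
  let n := lst.length
  let out0 : List (Option String) := List.replicate n none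
  let seen := lst.foldl (fun s r => if r ∈ s then s else s ++ [r]) []
  let out := seen.foldl (fun out v =>
      ((List.range n).foldl
        (fun (st : Int × List (Option String)) i =>
          if lst.getD i "" = v then
            (st.1 + 1, st.2.set i (some (v ++ "-" ++ PySem.Int.toStr (st.1 + 1))))
          else st)
        ((0 : Int), out)).2)
    out0
  out.map (fun o => o.getD "")

-- ===== PRECONDITION & SPEC =====
def Spec_parse_default_regions (regions : List String) (out : List String) : Prop := out = parse_default_regions_alt regions
instance (regions : List String) (out : List String) : Decidable (Spec_parse_default_regions regions out) := by unfold Spec_parse_default_regions; infer_instance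

-- ===== CLAIM (what is proved, stated in full; the proofs are below) =====
def Claim_equal_parse_default_regions : Prop := ∀ (regions : List String), Dom_parse_default_regions regions → Spec_parse_default_regions regions (parse_default_regions regions)

-- ===== LEMMAS AND PROOFS =====

-- the label both programs attach at position i
def pvF (lst : List String) (i : Nat) : String :=
  lst.getD i "" ++ "-" ++ PySem.Int.toStr (((lst.take (i+1)).count (lst.getD i "") : Nat) : Int)

-- reference: labels of the suffix, given the already-processed prefix (A's loop shape)
def pvLabels (pre : List String) : List String → List String
  | [] => []
  | r :: rs => (r ++ "-" ++ PySem.Int.toStr (((pre ++ [r]).count r : Nat) : Int)) :: pvLabels (pre ++ [r]) rs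

theorem pvLoopA (rs : List String) (pre out : List String) (d : PySem.Dict String Int)
    (H : ∀ r, d.get? r = if r ∈ pre then some ((pre.count r : Nat) : Int) else none) :
    (rs.foldl
      (fun (st : List String × PySem.Dict String Int) region =>
        let counts :=
          if st.2.contains region then
            st.2.insert region (st.2.getD region 0 + 1)
          else
            st.2.insert region 1
        (st.1 ++ [region ++ "-" ++ PySem.Int.toStr (counts.getD region 0)], counts))
      (out, d)).1 = out ++ pvLabels pre rs := by
  induction rs generalizing pre out d with
  | nil => simp [pvLabels]
  | cons r rs ih =>
    simp only [List.foldl_cons]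
    have hc : d.contains r = decide (r ∈ pre) := by
      rw [PySem.Dict.contains_eq_isSome_get?, H r]
      by_cases h : r ∈ pre <;> simp [h]
    have hd : d.getD r 0 = if r ∈ pre then ((pre.count r : Nat) : Int) else 0 := by
      rw [PySem.Dict.getD_eq_get?_getD, H r]
      by_cases h : r ∈ pre <;> simp [h]
    have hval : (if d.contains r = true then d.insert r (d.getD r 0 + 1) else d.insert r 1)
        = d.insert r (((pre ++ [r]).count r : Nat) : Int) := by
      rw [hc, hd]
      by_cases h : r ∈ pre
      · simp [h, List.count_append]
      · simp [h, List.count_append, List.count_eq_zero.mpr h]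
    have H' : ∀ x, (d.insert r (((pre ++ [r]).count r : Nat) : Int)).get? x =
        if x ∈ pre ++ [r] then some (((pre ++ [r]).count x : Nat) : Int) else none := by
      intro x
      rw [PySem.Dict.get?_insert]
      by_cases hx : x = r
      · subst hx; simp
      · rw [if_neg hx, H x]
        simp [hx, List.count_append, List.count_eq_zero.mpr (by simp [hx] : x ∉ [r])]
    simp only [hval, PySem.Dict.getD_insert_self]
    rw [ih (pre ++ [r]) _ _ H']
    simp [pvLabels]

-- A's labels in index form
theorem pvLabels_map (rs : List String) (pre : List String) :
    pvLabels pre rs = (List.range rs.length).map (fun j => pvF (pre ++ rs) (pre.length + j)) := by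
  induction rs generalizing pre with
  | nil => simp [pvLabels]
  | cons r rs ih =>
    rw [pvLabels, List.length_cons, List.range_succ_eq_map, List.map_cons, List.map_map]
    congr 1
    · have h1 : (pre ++ r :: rs).getD pre.length "" = r := by
        simp [List.getD]
      have h2 : (pre ++ r :: rs).take (pre.length + 1) = pre ++ [r] := by
        rw [List.take_append]
        simp
      simp only [pvF, Nat.add_zero, h2, h1]
    · have := ih (pre ++ [r])
      rw [this]
      apply List.map_congr_left
      intro j _
      simp only [Function.comp_apply]
      congr 1
      · simp
      · simp [List.length_append]
        omega

-- B's inner loop: scanning indices [a, n) for value v with k = count of v in lst.take a,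
-- writes pvF at matching positions, leaves others unchanged.
theorem pvInner (lst : List String) (v : String) (m a : Nat) (k : Int)
    (out : List (Option String))
    (hn : a + m = lst.length) (hlen : out.length = lst.length)
    (hk : k = (((lst.take a).count v : Nat) : Int)) :
    ((List.range' a m).foldl
      (fun (st : Int × List (Option String)) i =>
        if lst.getD i "" = v then
          (st.1 + 1, st.2.set i (some (v ++ "-" ++ PySem.Int.toStr (st.1 + 1))))
        else st)
      (k, out)).2
    = (List.range lst.length).map
        (fun j => if a ≤ j ∧ lst.getD j "" = v then some (pvF lst j) else out.getD j none) := by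
  induction m generalizing a k out with
  | zero =>
    have ha : a = lst.length := by omega
    apply List.ext_getElem (by simp [hlen])
    intro j h1 h2
    simp only [List.getElem_map, List.getElem_range]
    have hj : j < lst.length := by simpa using h2
    rw [if_neg (by omega)]
    simp [List.getD, List.getElem?_eq_getElem (by omega : j < out.length)]
  | succ m ih =>
    rw [List.range'_succ, List.foldl_cons]
    by_cases hv : lst.getD a "" = v
    · rw [if_pos hv]
      have hlt : a < lst.length := by omega
      have hga : lst[a]'hlt = v := by
        simpa [List.getD, List.getElem?_eq_getElem hlt] using hv
      have hc1 : (lst.take (a+1)).count v = (lst.take a).count v + 1 := by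
        rw [List.take_add_one, List.count_append, List.getElem?_eq_getElem hlt, hga]
        simp
      have hk' : k + 1 = (((lst.take (a+1)).count v : Nat) : Int) := by
        rw [hc1, hk]; push_cast; ring
      rw [ih (a+1) (k+1) _ (by omega) (by simp [hlen]) hk']
      apply List.map_congr_left
      intro j hj
      simp only [List.mem_range] at hj
      by_cases hja : a + 1 ≤ j ∧ lst.getD j "" = v
      · rw [if_pos hja, if_pos ⟨by omega, hja.2⟩]
      · rw [if_neg hja]
        by_cases hj2 : a ≤ j ∧ lst.getD j "" = v
        · have hja' : j = a := by
            rcases hj2 with ⟨h1, h2⟩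
            by_contra hne
            exact hja ⟨by omega, h2⟩
          subst hja'
          rw [if_pos hj2]
          have : pvF lst j = v ++ "-" ++ PySem.Int.toStr (k + 1) := by
            rw [pvF, hv, hk']
          rw [List.getD, List.getElem?_set_self' , ← this]
          simp [hlen, hj]
        · rw [if_neg hj2]
          have hne : j ≠ a := by
            intro h; subst h; exact hj2 ⟨le_refl _, hv⟩
          simp [List.getD, List.getElem?_set_ne (Ne.symm hne)]
    · rw [if_neg hv]
      have hlt : a < lst.length := by omega
      have hga : lst[a]'hlt ≠ v := by
        intro h; apply hv; simp [List.getD, List.getElem?_eq_getElem hlt, h]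
      have hc1 : (lst.take (a+1)).count v = (lst.take a).count v := by
        rw [List.take_add_one, List.count_append, List.getElem?_eq_getElem hlt]
        simp [hga]
      have hk' : k = (((lst.take (a+1)).count v : Nat) : Int) := by
        rw [hc1]; exact hk
      rw [ih (a+1) k out (by omega) hlen hk']
      apply List.map_congr_left
      intro j hj
      simp only [List.mem_range] at hj
      by_cases hja : a + 1 ≤ j ∧ lst.getD j "" = v
      · rw [if_pos hja, if_pos ⟨by omega, hja.2⟩]
      · rw [if_neg hja]
        by_cases hj2 : a ≤ j ∧ lst.getD j "" = v
        · exfalso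
          rcases hj2 with ⟨h1, h2⟩
          have : j = a := by
            by_contra hne; exact hja ⟨by omega, h2⟩
          subst this; exact hv h2
        · rw [if_neg hj2]

-- B's outer loop invariant: slots of values in `done` are filled with pvF, others hold `prev`.
theorem pvOuter (lst : List String) (vs : List String) (out : List (Option String))
    (g : Nat → Option String)
    (hlen : out.length = lst.length)
    (hout : out = (List.range lst.length).map g) :
    vs.foldl (fun out v =>
      ((List.range lst.length).foldl
        (fun (st : Int × List (Option String)) i =>
          if lst.getD i "" = v then
            (st.1 + 1, st.2.set i (some (v ++ "-" ++ PySem.Int.toStr (st.1 + 1))))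
          else st)
        ((0 : Int), out)).2) out
    = (List.range lst.length).map
        (fun j => if lst.getD j "" ∈ vs then some (pvF lst j) else g j) := by
  induction vs generalizing out g with
  | nil =>
    simpa using hout
  | cons v vs ih =>
    rw [List.foldl_cons]
    have h0 : List.range lst.length = List.range' 0 lst.length := by
      rw [List.range_eq_range']
    rw [h0]
    rw [pvInner lst v lst.length 0 0 out (by omega) hlen (by simp)]
    rw [← h0]
    rw [ih _ (fun j => if 0 ≤ j ∧ lst.getD j "" = v then some (pvF lst j) else out.getD j none)
        (by simp) rfl]
    apply List.map_congr_left
    intro j hj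
    simp only [List.mem_range] at hj
    have hgd : out.getD j none = g j := by
      simp [hout, List.getD, List.getElem?_range hj]
    simp only [List.mem_cons]
    by_cases h1 : lst.getD j "" ∈ vs
    · rw [if_pos h1, if_pos (Or.inr h1)]
    · rw [if_neg h1]
      by_cases h2 : lst.getD j "" = v
      · rw [if_pos ⟨Nat.zero_le j, h2⟩, if_pos (Or.inl h2)]
      · have h2' : ¬ (0 ≤ j ∧ lst.getD j "" = v) := by
          simp [List.getD] at h2 ⊢
          exact h2
        rw [if_neg h2', if_neg (by tauto), hgd]

-- dedup fold: `seen` contains every element of lst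
theorem pvSeen_mem (lst : List String) (acc : List String) (r : String)
    (hr : r ∈ lst ∨ r ∈ acc) :
    r ∈ lst.foldl (fun s x => if x ∈ s then s else s ++ [x]) acc := by
  induction lst generalizing acc with
  | nil => simpa using hr.resolve_left (by simp)
  | cons x xs ih =>
    rw [List.foldl_cons]
    apply ih
    rcases hr with h | h
    · rcases List.mem_cons.mp h with h | h
      · subst h
        right
        by_cases hx : r ∈ acc <;> simp [hx]
      · exact Or.inl h
    · right
      by_cases hx : x ∈ acc <;> simp [hx, h]

-- ===== VERDICT (by name: the statement is the Claim_ definition above) =====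
theorem parse_default_regions_spec : Claim_equal_parse_default_regions := by
  intro regions _
  unfold Spec_parse_default_regions parse_default_regions parse_default_regions_alt
  rw [pvLoopA regions [] [] PySem.Dict.empty (by intro r; simp [PySem.Dict.get?_empty])]
  simp only []
  rw [pvOuter regions _ (List.replicate regions.length none) (fun _ => none)
      (by simp) (by simp [List.map_const'])]
  have hall : ∀ j < regions.length,
      regions.getD j "" ∈ regions.foldl (fun s r => if r ∈ s then s else s ++ [r]) [] := by
    intro j hj
    apply pvSeen_mem
    left
    simp only [List.getD, List.getElem?_eq_getElem hj, Option.getD_some]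
    exact List.getElem_mem hj
  have hLab := pvLabels_map regions []
  simp only [List.nil_append, List.length_nil, Nat.zero_add] at hLab
  rw [hLab]
  rw [List.map_map]
  apply List.map_congr_left
  intro j hj
  simp only [List.mem_range] at hj
  have hm := hall j hj
  simp only [List.getD] at hm
  simp [Function.comp, hm]
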